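-- pv_equiv track=rewrite | github.com/BingoWon/mcp-crawl4ai-rag | src/chunking_deprecated/chunker.py | _split_by_first_header
-- ===== SOURCE A (Python) =====
-- def _split_by_first_header(text: str) -> tuple[str, str]:
--     """按第一个H标题分离context和content"""
--     lines = text.split('\n')
--
--     for i, line in enumerate(lines):
--         if line.strip().startswith('#'):
--             context = '\n'.join(lines[:i]).strip()
--             content = '\n'.join(lines[i:]).strip()
--             return context, content
--
--     # 没有找到H标题
--     return "", text.strip()
-- ===== SOURCE B (Python) =====
-- def _split_by_first_header(text: str) -> tuple[str, str]:
--     """按第一个H标题分离context和content"""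
--     pre, rest = "", text
--     while True:
--         # a header line: optional indentation whitespace, then '#'
--         if rest.lstrip(" \t\r").startswith("#"):
--             return pre.strip(), rest.strip()
--         head, sep, rest2 = rest.partition("\n")
--         if not sep:
--             return "", text.strip()
--         pre = pre + head + sep
--         rest = rest2
-- ===== Notes on version B (the rewrite author's own statement) =====
-- stated objective: alternative
-- what changed: B drops A's split-into-lines / enumerate / join-of-slices scheme and instead scans the original string line by line with str.partition on the newline separator, accumulating the already-consumed prefix and testing each line by stripping its indentation whitespace and checking for a leading hash character.
import Mathlib
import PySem

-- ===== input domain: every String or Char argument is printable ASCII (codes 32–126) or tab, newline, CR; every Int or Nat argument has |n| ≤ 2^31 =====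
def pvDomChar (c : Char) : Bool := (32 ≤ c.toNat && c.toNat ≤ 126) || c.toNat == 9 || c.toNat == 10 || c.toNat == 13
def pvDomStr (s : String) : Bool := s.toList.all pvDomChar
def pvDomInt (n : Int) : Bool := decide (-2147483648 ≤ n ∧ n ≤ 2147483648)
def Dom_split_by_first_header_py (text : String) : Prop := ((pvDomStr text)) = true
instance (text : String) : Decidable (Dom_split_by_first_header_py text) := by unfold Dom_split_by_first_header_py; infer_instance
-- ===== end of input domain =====

-- B replaces A's split-into-lines / enumerate / join-slices scheme with a single
-- partition-driven scan over the original string (objective: alternative).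


-- ===== PORT A =====
-- A's for-loop over enumerate(lines): recursion over the remaining lines carrying the
-- index i; 'lines[:i]' / 'lines[i:]' are take/drop on the full line list.
def pvALoop (text : List Char) (all : List (List Char)) (i : Nat) (rest : List (List Char)) :
    List Char × List Char :=
  match rest with
  | [] => ([], PySem.Chars.strip text)
  | line :: rest' =>
    if PySem.Chars.startswith (PySem.Chars.strip line) ['#'] then
      (PySem.Chars.strip (PySem.Chars.join ['\n'] (all.take i)),
       PySem.Chars.strip (PySem.Chars.join ['\n'] (all.drop i)))
    else pvALoop text all (i + 1) rest'

def split_by_first_header_py (text : String) : String × String :=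
  let lines := PySem.Chars.splitOn text.toList ['\n']
  let r := pvALoop text.toList lines 0 lines
  (String.mk r.1, String.mk r.2)

-- ===== PORT B =====
-- B's header test rest.lstrip(" \t\r").startswith("#"); str.lstrip with an explicit
-- char set is ported by hand as dropWhile over that set — exact.
def pvBHeader (rest : List Char) : Bool :=
  PySem.Chars.startswith (rest.dropWhile (fun c => [' ', '\t', '\r'].contains c)) ['#']

-- B's while-loop; str.partition('\n') is ported by hand for the single-char separator:
-- head = takeWhile (≠ '\n'), 'sep found' ↔ head is shorter than rest — exact.
def pvBLoop (text pre rest : List Char) : List Char × List Char :=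
  if pvBHeader rest then (PySem.Chars.strip pre, PySem.Chars.strip rest)
  else
    let head := rest.takeWhile (fun c => c ≠ '\n')
    if head.length = rest.length then ([], PySem.Chars.strip text)
    else pvBLoop text (pre ++ head ++ ['\n']) (rest.drop (head.length + 1))
termination_by rest.length
decreasing_by
  rename_i hne
  have h := (List.takeWhile_sublist (l := rest) (fun c => decide (c ≠ '\n'))).length_le
  have hh : head.length = (List.takeWhile (fun c => decide (c ≠ '\n')) rest).length := rfl
  simp only [List.length_drop]
  omega

def split_by_first_header_py_alt (text : String) : String × String :=
  let r := pvBLoop text.toList [] text.toList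
  (String.mk r.1, String.mk r.2)

-- ===== PRECONDITION & SPEC =====
def Spec_split_by_first_header_py (text : String) (out : String × String) : Prop := out = split_by_first_header_py_alt text
instance (text : String) (out : String × String) : Decidable (Spec_split_by_first_header_py text out) := by unfold Spec_split_by_first_header_py; infer_instance

-- ===== CLAIM (what is proved, stated in full; the proofs are below) =====
def Claim_equal_split_by_first_header_py : Prop := ∀ (text : String), Dom_split_by_first_header_py text → Spec_split_by_first_header_py text (split_by_first_header_py text)

-- ===== LEMMAS AND PROOFS =====

lemma pv_char_eq_iff_toNat (x c : Char) : x = c ↔ x.toNat = c.toNat := by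
  constructor
  · rintro rfl; rfl
  · intro h
    exact Char.ext (by exact UInt32.toNat_inj.mp h)

lemma pv_rstrip_append_nl (s : List Char) :
    PySem.Chars.rstrip (s ++ ['\n']) = PySem.Chars.rstrip s := by
  simp [PySem.Chars.rstrip, show PySem.Chars.isspace '\n' = true by decide]

lemma pv_strip_append_nl (s : List Char) :
    PySem.Chars.strip (s ++ ['\n']) = PySem.Chars.strip s := by
  unfold PySem.Chars.strip PySem.Chars.lstrip
  rw [List.dropWhile_append]
  split
  · rename_i h
    simp only [List.isEmpty_iff] at h
    rw [h]
    simp [PySem.Chars.rstrip, show PySem.Chars.isspace '\n' = true by decide]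
  · exact pv_rstrip_append_nl _

lemma pv_rstrip_cons_not_space (x : Char) (xs : List Char)
    (h : PySem.Chars.isspace x = false) :
    PySem.Chars.rstrip (x :: xs) = x :: PySem.Chars.rstrip xs := by
  unfold PySem.Chars.rstrip
  rw [show (x :: xs).reverse = xs.reverse ++ [x] by simp, List.dropWhile_append]
  split
  · rename_i hh
    simp only [List.isEmpty_iff] at hh
    simp [hh, h]
  · simp

lemma pv_join_append_singleton (sep : List Char) :
    ∀ (xs : List (List Char)) (l : List Char), xs ≠ [] →
    PySem.Chars.join sep (xs ++ [l]) = PySem.Chars.join sep xs ++ sep ++ l := by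
  intro xs
  induction xs with
  | nil => intro l h; exact absurd rfl h
  | cons q qs ih =>
    intro l _
    cases qs with
    | nil => simp [PySem.Chars.join_cons_cons, PySem.Chars.join_singleton]
    | cons q2 qs' =>
      have := ih l (by simp)
      simp only [List.cons_append, PySem.Chars.join_cons_cons] at *
      rw [this]
      simp [List.append_assoc]

lemma pv_splitOnP_mem (p : Char → Bool) : ∀ (s : List Char), ∀ l ∈ List.splitOnP p s,
    ∀ x ∈ l, x ∈ s ∧ ¬ p x = true := by
  intro s
  induction s with
  | nil => intro l hl x hx; simp [List.splitOnP_nil] at hl; subst hl; simp at hx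
  | cons a as ih =>
    intro l hl x hx
    rw [List.splitOnP_cons] at hl
    by_cases hpa : p a = true
    · simp only [hpa, if_true, List.mem_cons] at hl
      rcases hl with rfl | hl
      · simp at hx
      · have := ih l hl x hx
        exact ⟨List.mem_cons_of_mem _ this.1, this.2⟩
    · simp only [hpa] at hl
      obtain ⟨b, bs, hb⟩ := List.exists_cons_of_ne_nil (List.splitOnP_ne_nil p as)
      rw [hb] at hl
      rw [List.modifyHead_cons] at hl
      rcases List.mem_cons.mp hl with h0 | hl
      · subst h0
        rcases List.mem_cons.mp hx with h1 | hx'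
        · subst h1; exact ⟨List.mem_cons_self, hpa⟩
        · have := ih b (by rw [hb]; exact List.mem_cons_self) x hx'
          exact ⟨List.mem_cons_of_mem _ this.1, this.2⟩
      · have := ih l (by rw [hb]; exact List.mem_cons_of_mem _ hl) x hx
        exact ⟨List.mem_cons_of_mem _ this.1, this.2⟩

lemma pv_isspace_eq_ws3 (x : Char) (hd : pvDomChar x = true) (hx : x ≠ '\n') :
    PySem.Chars.isspace x = ([' ', '\t', '\r'].contains x) := by
  have c32 : ((' ' : Char)).toNat = 32 := rfl
  have c9 : (('\t' : Char)).toNat = 9 := rfl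
  have c13 : (('\r' : Char)).toNat = 13 := rfl
  have c10 : (('\n' : Char)).toNat = 10 := rfl
  have hx' : x.toNat ≠ 10 := by
    intro h
    exact hx ((pv_char_eq_iff_toNat x '\n').mpr (by rw [c10]; exact h))
  unfold pvDomChar at hd
  simp only [Bool.or_eq_true, Bool.and_eq_true, decide_eq_true_eq, beq_iff_eq] at hd
  rw [Bool.eq_iff_iff]
  simp only [PySem.Chars.isspace, List.contains_cons, List.contains_nil, Bool.or_false,
    Bool.or_eq_true, Bool.and_eq_true, decide_eq_true_eq, beq_iff_eq,
    pv_char_eq_iff_toNat, eq_comm (a := x), c32, c9, c13]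
  omega

lemma pv_dropWhile_head_false (p : Char → Bool) : ∀ (l : List Char) (x : Char) (xs : List Char),
    List.dropWhile p l = x :: xs → p x = false := by
  intro l
  induction l with
  | nil => intro x xs h; simp at h
  | cons a as ih =>
    intro x xs h
    rw [List.dropWhile_cons] at h
    split at h
    · exact ih _ _ h
    · rename_i hpa
      cases h
      exact Bool.not_eq_true _ ▸ (by simpa using hpa)

lemma pv_header_eq (l t : List Char) (hnl : '\n' ∉ l)
    (hdom : ∀ x ∈ l, pvDomChar x = true)
    (ht : t = [] ∨ ∃ t', t = '\n' :: t') :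
    pvBHeader (l ++ t) = PySem.Chars.startswith (PySem.Chars.strip l) ['#'] := by
  have hws : ∀ x ∈ l, PySem.Chars.isspace x = ([' ', '\t', '\r'].contains x) := by
    intro x hx
    exact pv_isspace_eq_ws3 x (hdom x hx) (fun he => hnl (he ▸ hx))
  have hls : l.dropWhile (fun c => [' ', '\t', '\r'].contains c) = PySem.Chars.lstrip l := by
    unfold PySem.Chars.lstrip
    clear hnl hdom
    induction l with
    | nil => rfl
    | cons a as ih =>
      have ha := hws a List.mem_cons_self
      rw [List.dropWhile_cons, List.dropWhile_cons, ← ha]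
      split
      · exact ih (fun x hx => hws x (List.mem_cons_of_mem _ hx))
      · rfl
  unfold pvBHeader
  rw [List.dropWhile_append, hls]
  cases hh : PySem.Chars.lstrip l with
  | nil =>
    simp only [hh, List.isEmpty_nil]
    have hstrip : PySem.Chars.strip l = [] := by
      unfold PySem.Chars.strip
      rw [hh]; rfl
    rw [hstrip]
    rcases ht with rfl | ⟨t', rfl⟩
    · simp [PySem.Chars.startswith, List.isPrefixOf]
    · rw [List.dropWhile_cons]
      simp [PySem.Chars.startswith, List.isPrefixOf]
  | cons x xs =>
    simp only [hh, List.isEmpty_cons, Bool.false_eq_true]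
    have hxns : PySem.Chars.isspace x = false :=
      pv_dropWhile_head_false _ l x xs hh
    unfold PySem.Chars.strip
    rw [hh, pv_rstrip_cons_not_space x xs hxns]
    simp [PySem.Chars.startswith, List.isPrefixOf]

lemma pv_go_spec (c : Char) : ∀ (l : List Char) (fuel : Nat) (cur : List Char)
    (acc : List (List Char)), l.length ≤ fuel →
    PySem.Chars.splitOn.go [c] fuel l cur acc
      = acc.reverse ++ (l.splitOn c).modifyHead (cur.reverse ++ ·) := by
  intro l
  induction l with
  | nil =>
    intro fuel cur acc _
    cases fuel <;>
      simp [PySem.Chars.splitOn.go, List.splitOn, List.splitOnP_nil, List.modifyHead]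
  | cons x rest ih =>
    intro fuel cur acc hle
    cases fuel with
    | zero => simp at hle
    | succ fuel' =>
      rw [show PySem.Chars.splitOn.go [c] (fuel'+1) (x::rest) cur acc =
          if [c].isPrefixOf (x::rest) then
            PySem.Chars.splitOn.go [c] fuel' (List.drop 1 (x::rest)) [] (cur.reverse :: acc)
          else PySem.Chars.splitOn.go [c] fuel' rest (x :: cur) acc from rfl]
      simp only [List.length_cons] at hle
      by_cases hcx : c = x
      · rw [if_pos (by simp [List.isPrefixOf, hcx])]
        rw [List.drop_one, List.tail_cons]
        rw [ih fuel' [] (cur.reverse :: acc) (by omega)]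
        have hsc : (x :: rest).splitOn c = [] :: rest.splitOn c := by
          simp [List.splitOn, List.splitOnP_cons, hcx]
        rw [hsc, List.modifyHead_cons]
        obtain ⟨b, bs, hb⟩ := List.exists_cons_of_ne_nil (List.splitOnP_ne_nil (fun y => y == c) rest)
        simp only [List.splitOn] at *
        rw [hb, List.modifyHead_cons]
        simp
      · rw [if_neg (by simp [List.isPrefixOf, hcx])]
        rw [ih fuel' (x :: cur) acc (by omega)]
        have hsc : (x :: rest).splitOn c = (rest.splitOn c).modifyHead (x :: ·) := by
          simp [List.splitOn, List.splitOnP_cons, Ne.symm hcx]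
        rw [hsc]
        obtain ⟨b, bs, hb⟩ := List.exists_cons_of_ne_nil (List.splitOnP_ne_nil (fun y => y == c) rest)
        simp only [List.splitOn] at *
        rw [hb, List.modifyHead_cons, List.modifyHead_cons, List.modifyHead_cons]
        simp

lemma pv_splitOn_eq (s : List Char) (c : Char) :
    PySem.Chars.splitOn s [c] = s.splitOn c := by
  unfold PySem.Chars.splitOn
  rw [pv_go_spec c s (s.length + 1) [] [] (by omega)]
  obtain ⟨b, bs, hb⟩ := List.exists_cons_of_ne_nil (List.splitOnP_ne_nil (fun x => x == c) s)
  simp only [List.splitOn] at *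
  rw [hb, List.modifyHead_cons]
  simp

lemma pv_take_succ_of_drop (all : List (List Char)) (i : Nat) (l : List Char)
    (ls' : List (List Char)) (hls : l :: ls' = all.drop i) :
    all.take (i + 1) = all.take i ++ [l] := by
  rw [List.take_add_one]
  have : all[i]? = some l := by
    have h0 : (all.drop i)[0]? = some l := by rw [← hls]; rfl
    rw [List.getElem?_drop] at h0
    simpa using h0
  rw [this]
  rfl

lemma pv_main_loop (all : List (List Char)) (text : List Char)
    (hnl : ∀ l ∈ all, '\n' ∉ l) (hdom : ∀ l ∈ all, ∀ x ∈ l, pvDomChar x = true) :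
    ∀ (ls : List (List Char)) (i : Nat) (pre : List Char),
      ls = all.drop i →
      pre = PySem.Chars.join ['\n'] (all.take i) ++ (if i = 0 then [] else ['\n']) →
      pvBLoop text pre (PySem.Chars.join ['\n'] ls) = pvALoop text all i ls := by
  intro ls
  induction ls with
  | nil =>
    intro i pre hls hpre
    rw [PySem.Chars.join_nil, pvBLoop]
    rw [show pvBHeader [] = false from rfl]
    simp only [Bool.false_eq_true, if_false, List.takeWhile_nil, List.length_nil]
    rfl
  | cons l ls' ih =>
    intro i pre hls hpre
    have hmem_l : l ∈ all := List.mem_of_mem_drop (i := i) (by rw [← hls]; exact List.mem_cons_self)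
    have hstrip_pre : PySem.Chars.strip pre = PySem.Chars.strip (PySem.Chars.join ['\n'] (all.take i)) := by
      by_cases hi : i = 0
      · rw [hpre, if_pos hi]; rw [List.append_nil]
      · rw [hpre, if_neg hi]; exact pv_strip_append_nl _
    have htw : l.takeWhile (fun c => decide (c ≠ '\n')) = l :=
      List.takeWhile_eq_self_iff.mpr (by
        intro x hx
        simp only [decide_eq_true_eq]
        exact fun he => hnl l hmem_l (he ▸ hx))
    cases ls' with
    | nil =>
      have hjoin1 : PySem.Chars.join ['\n'] [l] = l ++ [] := by
        rw [PySem.Chars.join_singleton, List.append_nil]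
      rw [hjoin1, pvBLoop]
      rw [pv_header_eq l [] (hnl l hmem_l) (hdom l hmem_l) (Or.inl rfl)]
      rw [pvALoop]
      by_cases hh : PySem.Chars.startswith (PySem.Chars.strip l) ['#'] = true
      · rw [if_pos hh, if_pos hh]
        rw [hstrip_pre, ← hls, List.append_nil]
        rw [show PySem.Chars.join ['\n'] [l] = l from PySem.Chars.join_singleton _ _]
      · rw [if_neg hh, if_neg hh]
        rw [List.append_nil]
        simp only [htw]
        rfl
    | cons l2 ls'' =>
      have hjoin2 : PySem.Chars.join ['\n'] (l :: l2 :: ls'') =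
          l ++ ('\n' :: PySem.Chars.join ['\n'] (l2 :: ls'')) := by
        rw [PySem.Chars.join_cons_cons]
        simp
      rw [hjoin2, pvBLoop]
      rw [pv_header_eq l ('\n' :: PySem.Chars.join ['\n'] (l2 :: ls'')) (hnl l hmem_l)
        (hdom l hmem_l) (Or.inr ⟨_, rfl⟩)]
      rw [pvALoop]
      by_cases hh : PySem.Chars.startswith (PySem.Chars.strip l) ['#'] = true
      · rw [if_pos hh, if_pos hh]
        rw [hstrip_pre, ← hls, ← hjoin2]
      · rw [if_neg hh, if_neg hh]
        have hhead : (l ++ ('\n' :: PySem.Chars.join ['\n'] (l2 :: ls''))).takeWhile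
            (fun c => decide (c ≠ '\n')) = l := by
          rw [List.takeWhile_append, htw]
          simp
        simp only [hhead]
        rw [if_neg (by simp only [List.length_append, List.length_cons]; omega)]
        have hdrop : (l ++ ('\n' :: PySem.Chars.join ['\n'] (l2 :: ls''))).drop (l.length + 1)
            = PySem.Chars.join ['\n'] (l2 :: ls'') := by
          rw [← List.drop_drop, List.drop_left]
          rfl
        rw [hdrop]
        have hls' : l2 :: ls'' = all.drop (i + 1) := by
          have h2 := List.drop_drop (i := 1) (j := i) (l := all)
          rw [← hls] at h2
          simp only [List.drop_succ_cons, List.drop_zero] at h2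
          rw [← h2]
        have hi1 : i < all.length := by
          by_contra hcon
          have : all.drop i = [] := List.drop_eq_nil_iff.mpr (by omega)
          rw [← hls] at this
          simp at this
        have hpre' : pre ++ l ++ ['\n'] =
            PySem.Chars.join ['\n'] (all.take (i + 1)) ++ (if i + 1 = 0 then [] else ['\n']) := by
          rw [if_neg (by omega)]
          rw [pv_take_succ_of_drop all i l (l2 :: ls'') hls]
          by_cases hi : i = 0
          · subst hi
            rw [hpre]
            simp [PySem.Chars.join_singleton]
          · have hne : all.take i ≠ [] := by
              have : (all.take i).length = i := by
                rw [List.length_take]; omega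
              intro hcon
              rw [hcon] at this
              simp at this
              omega
            rw [pv_join_append_singleton ['\n'] (all.take i) l hne, hpre, if_neg hi]
        exact ih (i + 1) (pre ++ l ++ ['\n']) hls' hpre'

-- ===== VERDICT (by name: the statement is the Claim_ definition above) =====
theorem split_by_first_header_py_spec : Claim_equal_split_by_first_header_py := by
  intro text hdom
  unfold Spec_split_by_first_header_py split_by_first_header_py split_by_first_header_py_alt
  have hsplit := pv_splitOn_eq text.toList '\n'
  have hmem := pv_splitOnP_mem (fun x => x == '\n') text.toList
  have hdomc : ∀ x ∈ text.toList, pvDomChar x = true := by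
    have := hdom
    unfold Dom_split_by_first_header_py pvDomStr at this
    simpa [List.all_eq_true] using this
  have hnl : ∀ l ∈ PySem.Chars.splitOn text.toList ['\n'], '\n' ∉ l := by
    intro l hl hx
    rw [hsplit] at hl
    have := (hmem l (by simpa [List.splitOn] using hl) '\n' hx).2
    simp at this
  have hdom' : ∀ l ∈ PySem.Chars.splitOn text.toList ['\n'], ∀ x ∈ l, pvDomChar x = true := by
    intro l hl x hx
    rw [hsplit] at hl
    exact hdomc x ((hmem l (by simpa [List.splitOn] using hl) x hx).1)
  have hjoin : PySem.Chars.join ['\n'] (PySem.Chars.splitOn text.toList ['\n']) = text.toList := by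
    rw [hsplit]
    exact List.intercalate_splitOn text.toList '\n'
  have := pv_main_loop (PySem.Chars.splitOn text.toList ['\n']) text.toList hnl hdom'
    (PySem.Chars.splitOn text.toList ['\n']) 0 [] (by simp) (by simp [PySem.Chars.join, List.intercalate])
  rw [hjoin] at this
  simp only [← this]
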